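-- pv_equiv track=rewrite | github.com/Naren1704/AIDE-AI-Development-Ensemble-ADK | V2 Chatbased - ADK/agent-server/agents/integration_agent.py | _resolve_file_conflicts
-- ===== SOURCE A (Python) =====
-- from typing import Dict, List, Any
--
-- def _resolve_file_conflicts(file_list: List[str]) -> List[str]:
--     """Resolve conflicts between duplicate files"""
--     conflict_groups = {
--         'index.html': ['index.html', 'templates/index.html', 'templates/home.html'],
--         'style.css': ['style.css', 'static/css/style.css', 'styles.css', 'static/css/styles.css'],
--         'app.js': ['app.js', 'static/js/app.js', 'scripts.js', 'static/js/scripts.js', 'main.js']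
--     }
--
--     resolved_files = []
--     used_groups = set()
--
--     for file_path in file_list:
--         matched = False
--         for group_name, conflict_group in conflict_groups.items():
--             if file_path in conflict_group:
--                 if group_name not in used_groups:
--                     # Use the preferred path for this group
--                     preferred = [f for f in conflict_group if f.startswith(('templates/', 'static/'))]
--                     if preferred:
--                         resolved_files.append(preferred[0])
--                     else:
--                         resolved_files.append(conflict_group[0])
--                     used_groups.add(group_name)
--                 matched = True
--                 break
--
--         if not matched and file_path not in resolved_files:
--             resolved_files.append(file_path)
--
--     return resolved_files
-- ===== SOURCE B (Python) =====
-- # Table-driven rewrite: the conflict groups are constants, so the path->group and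
-- # group->preferred-output maps are written out once as literal dicts; the function
-- # is a single pass doing one dict lookup per file instead of scanning every group
-- # and re-filtering it for the preferred path.
--
-- _PATH_TO_GROUP = {
--     'index.html': 'index.html',
--     'templates/index.html': 'index.html',
--     'templates/home.html': 'index.html',
--     'style.css': 'style.css',
--     'static/css/style.css': 'style.css',
--     'styles.css': 'style.css',
--     'static/css/styles.css': 'style.css',
--     'app.js': 'app.js',
--     'static/js/app.js': 'app.js',
--     'scripts.js': 'app.js',
--     'static/js/scripts.js': 'app.js',
--     'main.js': 'app.js',
-- }
--
-- _GROUP_PREFERRED = {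
--     'index.html': 'templates/index.html',
--     'style.css': 'static/css/style.css',
--     'app.js': 'static/js/app.js',
-- }
--
-- def _resolve_file_conflicts(file_list):
--     """Resolve conflicts between duplicate files"""
--     resolved = []
--     used = set()
--     for fp in file_list:
--         group = _PATH_TO_GROUP.get(fp)
--         if group is not None:
--             if group not in used:
--                 resolved.append(_GROUP_PREFERRED[group])
--                 used.add(group)
--         elif fp not in resolved:
--             resolved.append(fp)
--     return resolved
-- ===== Notes on version B (the rewrite author's own statement) =====
-- stated objective: simpler
-- what changed: The per-file scan over all conflict groups and the per-hit re-filtering for a preferred path are replaced by two precomputed literal tables (path->group, group->preferred) and a single dict lookup per file.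
import Mathlib
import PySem

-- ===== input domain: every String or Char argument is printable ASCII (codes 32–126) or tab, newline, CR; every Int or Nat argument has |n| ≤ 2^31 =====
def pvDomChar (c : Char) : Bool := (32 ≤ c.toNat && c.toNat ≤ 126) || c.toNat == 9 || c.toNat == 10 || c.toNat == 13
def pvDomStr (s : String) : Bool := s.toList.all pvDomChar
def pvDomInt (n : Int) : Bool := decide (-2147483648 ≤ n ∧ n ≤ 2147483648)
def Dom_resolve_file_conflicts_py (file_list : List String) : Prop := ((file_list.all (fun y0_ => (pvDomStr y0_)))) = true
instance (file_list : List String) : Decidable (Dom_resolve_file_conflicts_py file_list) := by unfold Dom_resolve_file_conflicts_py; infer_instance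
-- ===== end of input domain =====

-- B replaces A's per-file scan over all conflict groups (with a filter recomputing the
-- preferred path on every hit) by two precomputed literal tables and one lookup per file
-- (objective: simpler). Equivalence of the return value is proved on all inputs.

-- ===== PORT A =====
-- the literal dict `conflict_groups` (constant, insertion order)
def pvGroupsA : List (String × List String) :=
  [("index.html", ["index.html", "templates/index.html", "templates/home.html"]),
   ("style.css", ["style.css", "static/css/style.css", "styles.css", "static/css/styles.css"]),
   ("app.js", ["app.js", "static/js/app.js", "scripts.js", "static/js/scripts.js", "main.js"])]

-- the filter predicate `f.startswith(('templates/', 'static/'))` from A's list comprehension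
def pvPrefPred (f : String) : Bool :=
  PySem.Str.startswith f "templates/" || PySem.Str.startswith f "static/"

-- the inner `for group_name, conflict_group in conflict_groups.items(): … break` loop:
-- returns (resolved_files, used_groups, matched) as left after the loop body / break
def pvInnerA (fp : String) (resolved : List String) (used : PySem.Set String) :
    List (String × List String) → List String × PySem.Set String × Bool
  | [] => (resolved, used, false)
  | (gname, cg) :: rest =>
    if cg.contains fp then
      if used.contains gname then (resolved, used, true)
      else
        let preferred := cg.filter pvPrefPred
        match preferred with
        | p :: _ => (resolved ++ [p], PySem.Set.add used gname, true)
        | [] => (resolved ++ [cg.headD ""], PySem.Set.add used gname, true)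
          -- conflict_group[0]: every constant group is nonempty, so headD's default is never used
    else pvInnerA fp resolved used rest

-- one iteration of the outer `for file_path in file_list` loop
def pvStepA (s : List String × PySem.Set String) (fp : String) :
    List String × PySem.Set String :=
  match pvInnerA fp s.1 s.2 pvGroupsA with
  | (resolved, used, matched) =>
    if matched then (resolved, used)
    else if resolved.contains fp then (resolved, used)
    else (resolved ++ [fp], used)

def resolve_file_conflicts_py (file_list : List String) : List String :=
  (file_list.foldl pvStepA ([], PySem.Set.empty)).1

-- ===== PORT B =====
def pvPathToGroup : PySem.Dict String String := PySem.Dict.mk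
  [("index.html", "index.html"),
   ("templates/index.html", "index.html"),
   ("templates/home.html", "index.html"),
   ("style.css", "style.css"),
   ("static/css/style.css", "style.css"),
   ("styles.css", "style.css"),
   ("static/css/styles.css", "style.css"),
   ("app.js", "app.js"),
   ("static/js/app.js", "app.js"),
   ("scripts.js", "app.js"),
   ("static/js/scripts.js", "app.js"),
   ("main.js", "app.js")]

def pvGroupPreferred : PySem.Dict String String := PySem.Dict.mk
  [("index.html", "templates/index.html"),
   ("style.css", "static/css/style.css"),
   ("app.js", "static/js/app.js")]

-- one iteration of Source B's loop
def pvStepB (s : List String × PySem.Set String) (fp : String) :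
    List String × PySem.Set String :=
  match PySem.Dict.get? pvPathToGroup fp with
  | some group =>
    if PySem.Set.contains s.2 group then s
    else (s.1 ++ [(PySem.Dict.get? pvGroupPreferred group).getD ""], PySem.Set.add s.2 group)
      -- _GROUP_PREFERRED[group]: group is always a key of the table, default never used
  | none => if s.1.contains fp then s else (s.1 ++ [fp], s.2)

def resolve_file_conflicts_py_alt (file_list : List String) : List String :=
  (file_list.foldl pvStepB ([], PySem.Set.empty)).1

-- ===== PRECONDITION & SPEC =====
def Spec_resolve_file_conflicts_py (file_list : List String) (out : List String) : Prop := out = resolve_file_conflicts_py_alt file_list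
instance (file_list : List String) (out : List String) : Decidable (Spec_resolve_file_conflicts_py file_list out) := by unfold Spec_resolve_file_conflicts_py; infer_instance

-- ===== CLAIM (what is proved, stated in full; the proofs are below) =====
def Claim_equal_resolve_file_conflicts_py : Prop := ∀ (file_list : List String), Dom_resolve_file_conflicts_py file_list → Spec_resolve_file_conflicts_py file_list (resolve_file_conflicts_py file_list)

-- ===== LEMMAS AND PROOFS =====

-- the filter from A's comprehension, evaluated on each constant conflict group
lemma pvFilt1 : List.filter pvPrefPred ["index.html", "templates/index.html", "templates/home.html"] = ["templates/index.html", "templates/home.html"] := by decide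
lemma pvFilt2 : List.filter pvPrefPred ["style.css", "static/css/style.css", "styles.css", "static/css/styles.css"] = ["static/css/style.css", "static/css/styles.css"] := by decide
lemma pvFilt3 : List.filter pvPrefPred ["app.js", "static/js/app.js", "scripts.js", "static/js/scripts.js", "main.js"] = ["static/js/app.js", "static/js/scripts.js"] := by decide

-- the two loop bodies agree on every file path and every loop state
lemma pvStep_eq (s : List String × PySem.Set String) (fp : String) :
    pvStepA s fp = pvStepB s fp := by
  by_cases h1 : fp = "index.html"
  · subst h1
    simp [pvStepA, pvStepB, pvInnerA, pvGroupsA, pvPathToGroup, pvGroupPreferred, PySem.Dict.get?, PySem.Set.contains, PySem.Set.add, pvFilt1]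
    split_ifs <;> simp_all
  by_cases h2 : fp = "templates/index.html"
  · subst h2
    simp [pvStepA, pvStepB, pvInnerA, pvGroupsA, pvPathToGroup, pvGroupPreferred, PySem.Dict.get?, PySem.Set.contains, PySem.Set.add, pvFilt1]
    split_ifs <;> simp_all
  by_cases h3 : fp = "templates/home.html"
  · subst h3
    simp [pvStepA, pvStepB, pvInnerA, pvGroupsA, pvPathToGroup, pvGroupPreferred, PySem.Dict.get?, PySem.Set.contains, PySem.Set.add, pvFilt1]
    split_ifs <;> simp_all
  by_cases h4 : fp = "style.css"
  · subst h4
    simp [pvStepA, pvStepB, pvInnerA, pvGroupsA, pvPathToGroup, pvGroupPreferred, PySem.Dict.get?, PySem.Set.contains, PySem.Set.add, pvFilt2]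
    split_ifs <;> simp_all
  by_cases h5 : fp = "static/css/style.css"
  · subst h5
    simp [pvStepA, pvStepB, pvInnerA, pvGroupsA, pvPathToGroup, pvGroupPreferred, PySem.Dict.get?, PySem.Set.contains, PySem.Set.add, pvFilt2]
    split_ifs <;> simp_all
  by_cases h6 : fp = "styles.css"
  · subst h6
    simp [pvStepA, pvStepB, pvInnerA, pvGroupsA, pvPathToGroup, pvGroupPreferred, PySem.Dict.get?, PySem.Set.contains, PySem.Set.add, pvFilt2]
    split_ifs <;> simp_all
  by_cases h7 : fp = "static/css/styles.css"
  · subst h7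
    simp [pvStepA, pvStepB, pvInnerA, pvGroupsA, pvPathToGroup, pvGroupPreferred, PySem.Dict.get?, PySem.Set.contains, PySem.Set.add, pvFilt2]
    split_ifs <;> simp_all
  by_cases h8 : fp = "app.js"
  · subst h8
    simp [pvStepA, pvStepB, pvInnerA, pvGroupsA, pvPathToGroup, pvGroupPreferred, PySem.Dict.get?, PySem.Set.contains, PySem.Set.add, pvFilt3]
    split_ifs <;> simp_all
  by_cases h9 : fp = "static/js/app.js"
  · subst h9
    simp [pvStepA, pvStepB, pvInnerA, pvGroupsA, pvPathToGroup, pvGroupPreferred, PySem.Dict.get?, PySem.Set.contains, PySem.Set.add, pvFilt3]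
    split_ifs <;> simp_all
  by_cases h10 : fp = "scripts.js"
  · subst h10
    simp [pvStepA, pvStepB, pvInnerA, pvGroupsA, pvPathToGroup, pvGroupPreferred, PySem.Dict.get?, PySem.Set.contains, PySem.Set.add, pvFilt3]
    split_ifs <;> simp_all
  by_cases h11 : fp = "static/js/scripts.js"
  · subst h11
    simp [pvStepA, pvStepB, pvInnerA, pvGroupsA, pvPathToGroup, pvGroupPreferred, PySem.Dict.get?, PySem.Set.contains, PySem.Set.add, pvFilt3]
    split_ifs <;> simp_all
  by_cases h12 : fp = "main.js"
  · subst h12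
    simp [pvStepA, pvStepB, pvInnerA, pvGroupsA, pvPathToGroup, pvGroupPreferred, PySem.Dict.get?, PySem.Set.contains, PySem.Set.add, pvFilt3]
    split_ifs <;> simp_all
  simp [pvStepA, pvStepB, pvInnerA, pvGroupsA, pvPathToGroup, pvGroupPreferred, PySem.Dict.get?, PySem.Set.contains, PySem.Set.add, List.find?,
      h1, beq_eq_false_iff_ne.mpr (Ne.symm h1),
      h2, beq_eq_false_iff_ne.mpr (Ne.symm h2),
      h3, beq_eq_false_iff_ne.mpr (Ne.symm h3),
      h4, beq_eq_false_iff_ne.mpr (Ne.symm h4),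
      h5, beq_eq_false_iff_ne.mpr (Ne.symm h5),
      h6, beq_eq_false_iff_ne.mpr (Ne.symm h6),
      h7, beq_eq_false_iff_ne.mpr (Ne.symm h7),
      h8, beq_eq_false_iff_ne.mpr (Ne.symm h8),
      h9, beq_eq_false_iff_ne.mpr (Ne.symm h9),
      h10, beq_eq_false_iff_ne.mpr (Ne.symm h10),
      h11, beq_eq_false_iff_ne.mpr (Ne.symm h11),
      h12, beq_eq_false_iff_ne.mpr (Ne.symm h12)]

-- ===== VERDICT (by name: the statement is the Claim_ definition above) =====
theorem resolve_file_conflicts_py_spec : Claim_equal_resolve_file_conflicts_py := by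
  intro file_list _
  unfold Spec_resolve_file_conflicts_py resolve_file_conflicts_py resolve_file_conflicts_py_alt
  rw [show pvStepA = pvStepB from funext fun s => funext fun fp => pvStep_eq s fp]
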